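-- pv_equiv track=rewrite | github.com/Josesosa0777/Pytch | dataio/src/measparser/kb_kpi_evaluation.py | checkForContinuity
-- ===== SOURCE A (Python) =====
-- def checkForContinuity(src):
--     idx_lst = []
--     break_lst = []
--     index = 0
--
--     for current, next in zip(src, src[1:]):
--         if current != next:
--             break_lst.append(index + 1)
--         index += 1
--
--     break_lst.append(index)
--     idx_lst.append([0, break_lst[0]])
--
--     for i in range(1, len(break_lst)):
--         idx_lst.append([break_lst[i - 1], break_lst[i]])
--
--     return idx_lst
-- ===== SOURCE B (Python) =====
-- def checkForContinuity(src):
--     # single pass: emit an interval whenever the value changes; one running start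
--     result = []
--     start = 0
--     index = 0
--     for current, nxt in zip(src, src[1:]):
--         index += 1
--         if current != nxt:
--             result.append([start, index])
--             start = index
--     result.append([start, index])
--     return result
-- ===== Notes on version B (the rewrite author's own statement) =====
-- stated objective: simpler
-- what changed: A builds a break-position list in one loop and then a second indexed loop turns it into intervals; B is a single pass that emits each interval directly at a value-change boundary with a running start, no intermediate break list and no indexing.
import Mathlib
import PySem

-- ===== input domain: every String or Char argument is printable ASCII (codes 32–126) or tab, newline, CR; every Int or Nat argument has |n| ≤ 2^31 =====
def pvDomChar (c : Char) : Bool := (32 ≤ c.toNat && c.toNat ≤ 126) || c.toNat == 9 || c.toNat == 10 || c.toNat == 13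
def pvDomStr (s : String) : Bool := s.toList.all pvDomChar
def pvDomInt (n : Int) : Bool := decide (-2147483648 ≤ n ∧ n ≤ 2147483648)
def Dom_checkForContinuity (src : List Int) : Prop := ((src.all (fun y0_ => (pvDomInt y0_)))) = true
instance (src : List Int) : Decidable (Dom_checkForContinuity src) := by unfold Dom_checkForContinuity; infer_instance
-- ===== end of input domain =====

-- B is a simpler single pass that emits each interval at the change boundary,
-- replacing A's two-phase break-list construction; return value only, no speed claim.

-- ===== PORT A =====
-- loop body of A's first for-loop: state = (break_lst, index)
def pvAStep (st : List Int × Int) (p : Int × Int) : List Int × Int :=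
  (if p.1 ≠ p.2 then st.1 ++ [st.2 + 1] else st.1, st.2 + 1)

def checkForContinuity (src : List Int) : List (List Int) :=
  let st := (src.zip (PySem.List.slice src (some 1) none)).foldl pvAStep ([], 0)
  let breakLst := st.1 ++ [st.2]
  -- break_lst[0], break_lst[i-1], break_lst[i]: always in range here, so pyGetD is exact
  let idxLst : List (List Int) := [[0, PySem.List.pyGetD breakLst 0 0]]
  (PySem.List.pyRange 1 (PySem.List.len breakLst) 1).foldl
    (fun acc i => acc ++ [[PySem.List.pyGetD breakLst (i - 1) 0, PySem.List.pyGetD breakLst i 0]]) idxLst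

-- ===== PORT B =====
-- loop body of B's single pass: state = (result, start, index)
def pvBStep (st : List (List Int) × Int × Int) (p : Int × Int) : List (List Int) × Int × Int :=
  if p.1 ≠ p.2 then (st.1 ++ [[st.2.1, st.2.2 + 1]], st.2.2 + 1, st.2.2 + 1)
  else (st.1, st.2.1, st.2.2 + 1)

def checkForContinuity_alt (src : List Int) : List (List Int) :=
  let st := (src.zip (PySem.List.slice src (some 1) none)).foldl pvBStep ([], 0, 0)
  st.1 ++ [[st.2.1, st.2.2]]

-- ===== PRECONDITION & SPEC =====
def Spec_checkForContinuity (src : List Int) (out : List (List Int)) : Prop := out = checkForContinuity_alt src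
instance (src : List Int) (out : List (List Int)) : Decidable (Spec_checkForContinuity src out) := by unfold Spec_checkForContinuity; infer_instance

-- ===== CLAIM (what is proved, stated in full; the proofs are below) =====
def Claim_equal_checkForContinuity : Prop := ∀ (src : List Int), Dom_checkForContinuity src → Spec_checkForContinuity src (checkForContinuity src)

-- ===== LEMMAS AND PROOFS =====

-- intervals cut at the break positions, and the last start (proof-only helpers)
def pvIvs (s : Int) : List Int → List (List Int)
  | [] => []
  | b :: bs => [s, b] :: pvIvs b bs

def pvLastS (s : Int) : List Int → Int
  | [] => s
  | b :: bs => pvLastS b bs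

theorem pvAFold_append (ps : List (Int × Int)) : ∀ (bl : List Int) (i : Int),
    ps.foldl pvAStep (bl, i) =
      (bl ++ (ps.foldl pvAStep ([], i)).1, (ps.foldl pvAStep ([], i)).2) := by
  induction ps with
  | nil => intro bl i; simp
  | cons p ps ih =>
    intro bl i
    by_cases h : p.1 = p.2
    · simp only [List.foldl_cons, pvAStep, h, ne_eq, not_true_eq_false, ite_false,
        List.nil_append]
      rw [ih]
    · simp only [List.foldl_cons, pvAStep, h, ne_eq, not_false_eq_true, ite_true,
        List.nil_append]
      rw [ih, ih [i + 1] (i + 1)]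
      simp

theorem pvBFold_chain (ps : List (Int × Int)) : ∀ (res : List (List Int)) (s i : Int),
    ps.foldl pvBStep (res, s, i) =
      (res ++ pvIvs s (ps.foldl pvAStep ([], i)).1,
       pvLastS s (ps.foldl pvAStep ([], i)).1,
       (ps.foldl pvAStep ([], i)).2) := by
  induction ps with
  | nil => intro res s i; simp [pvIvs, pvLastS]
  | cons p ps ih =>
    intro res s i
    by_cases h : p.1 = p.2
    · simp only [List.foldl_cons, pvBStep, pvAStep, h, ne_eq, not_true_eq_false, ite_false,
        List.nil_append]
      rw [ih]
    · simp only [List.foldl_cons, pvBStep, pvAStep, h, ne_eq, not_false_eq_true, ite_true,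
        List.nil_append]
      rw [ih, pvAFold_append ps [i + 1] (i + 1)]
      simp [pvIvs, pvLastS]

theorem pvIvs_append (bs : List Int) : ∀ (s b : Int),
    pvIvs s (bs ++ [b]) = pvIvs s bs ++ [[pvLastS s bs, b]] := by
  induction bs with
  | nil => intro s b; simp [pvIvs, pvLastS]
  | cons c cs ih => intro s b; simp [pvIvs, pvLastS, ih]

theorem pvLastS_getLast (bs : List Int) : ∀ (s : Int) (h : bs ≠ []),
    pvLastS s bs = bs.getLast h := by
  induction bs with
  | nil => intro s h; exact absurd rfl h
  | cons c cs ih =>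
    intro s h
    cases cs with
    | nil => simp [pvLastS]
    | cons d ds =>
      rw [show pvLastS s (c :: d :: ds) = pvLastS c (d :: ds) from rfl, ih c (by simp)]
      exact (List.getLast_cons (by simp)).symm

-- pyGetD into the left part of an append
theorem pvPyGetD_append_left (M ys : List Int) (j : Int) (d : Int)
    (h0 : 0 ≤ j) (h1 : j < M.length) :
    PySem.List.pyGetD (M ++ ys) j d = PySem.List.pyGetD M j d := by
  rw [PySem.List.pyGetD_eq_getElem (M ++ ys) d h0 (by simp; omega),
      PySem.List.pyGetD_eq_getElem M d h0 (by exact_mod_cast h1)]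
  exact List.getElem_append_left (by omega)

-- A's second loop (as a map over the range) produces exactly the chained intervals
theorem pvRangeMap (L : List Int) (hL : L ≠ []) : ∀ (s : Int),
    [[s, PySem.List.pyGetD L 0 0]] ++
      (PySem.List.pyRange 1 (PySem.List.len L) 1).map
        (fun i => [PySem.List.pyGetD L (i - 1) 0, PySem.List.pyGetD L i 0]) = pvIvs s L := by
  induction L using List.reverseRecOn with
  | nil => exact absurd rfl hL
  | append_singleton M b ih =>
    intro s
    cases hM : M with
    | nil =>
      subst hM
      simp [PySem.List.len, PySem.List.pyRange_one_eq_nil, pvIvs, PySem.List.pyGetD_zero_cons]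
    | cons m ms =>
      rw [← hM]
      have hMne : M ≠ [] := by simp [hM]
      have hlen : PySem.List.len (M ++ [b]) = (M.length : Int) + 1 := by
        simp [PySem.List.len_eq]
      have hrange : PySem.List.pyRange 1 ((M.length : Int) + 1) 1 =
          PySem.List.pyRange 1 (M.length : Int) 1 ++ [(M.length : Int)] :=
        PySem.List.pyRange_one_succ_right (by
          have : 1 ≤ M.length := by cases M <;> simp_all
          exact_mod_cast this)
      rw [hlen, hrange, List.map_append]
      have hcong : (PySem.List.pyRange 1 (M.length : Int) 1).map
          (fun i => [PySem.List.pyGetD (M ++ [b]) (i - 1) 0, PySem.List.pyGetD (M ++ [b]) i 0]) =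
          (PySem.List.pyRange 1 (M.length : Int) 1).map
          (fun i => [PySem.List.pyGetD M (i - 1) 0, PySem.List.pyGetD M i 0]) := by
        apply List.map_congr_left
        intro i hi
        have hi' := (PySem.List.mem_pyRange_one).mp hi
        rw [pvPyGetD_append_left M [b] (i - 1) 0 (by omega) (by omega),
            pvPyGetD_append_left M [b] i 0 (by omega) (by omega)]
      have hget0 : PySem.List.pyGetD (M ++ [b]) 0 0 = PySem.List.pyGetD M 0 0 :=
        pvPyGetD_append_left M [b] 0 0 (by omega) (by cases M <;> simp_all)
      have hgetb : PySem.List.pyGetD (M ++ [b]) (M.length : Int) 0 = b := by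
        rw [PySem.List.pyGetD_eq_getElem (M ++ [b]) 0 (by omega) (by simp)]
        simp
      have hgetlast : PySem.List.pyGetD (M ++ [b]) ((M.length : Int) - 1) 0 = M.getLast hMne := by
        have h1 : 1 ≤ M.length := by cases M <;> simp_all
        rw [PySem.List.pyGetD_eq_getElem (M ++ [b]) 0 (by omega)
          (by simp only [List.length_append, List.length_cons, List.length_nil]; omega)]
        rw [List.getElem_append_left (by omega)]
        have ht : ((M.length : Int) - 1).toNat = M.length - 1 := by omega
        simp [ht, List.getLast_eq_getElem]
      have ih' := ih hMne s
      rw [PySem.List.len_eq] at ih'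
      rw [hcong, hget0, List.map_singleton, hgetb, hgetlast, ← List.append_assoc, ih',
        pvIvs_append]
      rw [pvLastS_getLast M s hMne]

-- ===== VERDICT (by name: the statement is the Claim_ definition above) =====
theorem checkForContinuity_spec : Claim_equal_checkForContinuity := by
  intro src _
  unfold Spec_checkForContinuity checkForContinuity checkForContinuity_alt
  simp only
  set ps := src.zip (PySem.List.slice src (some 1) none) with hps
  rw [pvBFold_chain ps [] 0 0]
  set st := ps.foldl pvAStep ([], 0) with hst
  rw [PySem.List.foldl_append_singleton_eq_map]
  rw [pvRangeMap (st.1 ++ [st.2]) (by simp) 0, pvIvs_append]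
  simp
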